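-- pv_equiv track=rewrite | github.com/masrul/BibtexFixer | BibtexFixer/BibtexFixer.py | getBlockID
-- ===== SOURCE A (Python) =====
-- def getBlockID(block):
--     blockString = ""
--     blockID = ""
--     for line in block:
--
--         blockString += line
--
--     save = False
--     for char in blockString:
--         if char in "({":
--             save = True
--         elif char in "=,":
--             break
--         elif save:
--             blockID += char
--     return blockID
-- ===== SOURCE B (Python) =====
-- def getBlockID(block):
--     s = "".join(block)
--     # position of the first delimiter ('=' or ','), or end of string
--     cut = len(s)
--     for d in "=,":
--         j = s.find(d)
--         if j != -1 and j < cut: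
--             cut = j
--     head = s[:cut]
--     # position of the first opening bracket before the delimiter, or -1
--     br = -1
--     for b in "({":
--         j = head.find(b)
--         if j != -1 and (br == -1 or j < br):
--             br = j
--     if br == -1:
--         return ""
--     return head[br + 1:].replace("(", "").replace("{", "")
-- ===== Notes on version B (the rewrite author's own statement) =====
-- stated objective: idiomatic
-- what changed: A's single stateful character scan (save flag, early break) is replaced by a find/slice/replace pipeline: locate the first '='/',' with str.find and slice it off, locate the first '('/'{' in that prefix, then slice past it and strip remaining brackets with str.replace.
import Mathlib
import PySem

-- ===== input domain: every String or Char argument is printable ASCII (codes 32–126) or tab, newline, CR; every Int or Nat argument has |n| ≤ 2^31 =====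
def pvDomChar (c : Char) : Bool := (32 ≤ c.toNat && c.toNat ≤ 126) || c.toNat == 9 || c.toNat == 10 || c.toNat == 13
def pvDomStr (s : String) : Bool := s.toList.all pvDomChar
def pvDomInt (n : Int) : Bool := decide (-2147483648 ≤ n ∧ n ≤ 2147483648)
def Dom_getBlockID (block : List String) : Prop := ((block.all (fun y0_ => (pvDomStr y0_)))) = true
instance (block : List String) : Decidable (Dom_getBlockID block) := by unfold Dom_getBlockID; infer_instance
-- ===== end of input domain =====

-- B replaces A's stateful character-by-character scan (save flag, early break) by an
-- idiomatic find/slice/replace pipeline: cut at the first delimiter, locate the first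
-- opening bracket, slice off the rest and strip remaining brackets.

-- B replaces A's stateful character-by-character scan (save flag, early break) with an
-- idiomatic find/slice/replace pipeline: cut at the first delimiter, find the first opening
-- bracket, slice off the ID and strip any remaining brackets (objective: idiomatic).

-- ===== PORT A =====
-- A's second loop: for char in blockString, with the save flag and the early break on '='/','
def pvAScan : List Char → Bool → List Char → List Char
  | [], _, blockID => blockID
  | char :: rest, save, blockID =>
    if PySem.Chars.isIn [char] ['(', '{'] then pvAScan rest true blockID
    else if PySem.Chars.isIn [char] ['=', ','] then blockID
    else if save then pvAScan rest save (blockID ++ [char])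
    else pvAScan rest save blockID

def getBlockID (block : List String) : String :=
  let blockString := block.foldl (fun bs line => bs ++ line.toList) []
  String.ofList (pvAScan blockString false [])


-- ===== PORT B =====
def getBlockID_alt (block : List String) : String :=
  let s := (PySem.Str.join "" block).toList
  let cut := ['=', ','].foldl (fun cut d =>
      let j := PySem.Chars.find s [d]
      if j ≠ -1 ∧ j < cut then j else cut) ((s.length : Int))
  let head := PySem.Chars.slice s none (some cut)
  let br := ['(', '{'].foldl (fun br b =>
      let j := PySem.Chars.find head [b]
      if j ≠ -1 ∧ (br = -1 ∨ j < br) then j else br) (-1)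
  if br = -1 then ""
  else String.ofList (PySem.Chars.replace (PySem.Chars.replace
        (PySem.Chars.slice head (some (br + 1)) none) ['('] []) ['{'] [])


-- ===== PRECONDITION & SPEC =====
def Spec_getBlockID (block : List String) (out : String) : Prop := out = getBlockID_alt block
instance (block : List String) (out : String) : Decidable (Spec_getBlockID block out) := by unfold Spec_getBlockID; infer_instance

-- ===== CLAIM (what is proved, stated in full; the proofs are below) =====
def Claim_equal_getBlockID : Prop := ∀ (block : List String), Dom_getBlockID block → Spec_getBlockID block (getBlockID block)

-- ===== LEMMAS AND PROOFS =====

def pvDl (c : Char) : Bool := c == '=' || c == ','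
def pvBr (c : Char) : Bool := c == '(' || c == '{'

theorem pv_isIn_pair (c a b : Char) : PySem.Chars.isIn [c] [a, b] = (c == a || c == b) := by
  have h := PySem.Chars.isIn_iff_infix [c] [a, b]
  rw [List.singleton_infix_iff] at h
  cases hb : (c == a || c == b) with
  | true =>
    apply h.mpr; simp at hb ⊢; rcases hb with rfl | rfl <;> simp
  | false =>
    cases hi : PySem.Chars.isIn [c] [a, b]
    · rfl
    · exfalso; have := h.mp hi; simp at this hb; rcases this with rfl | rfl <;> simp_all

theorem pv_takeWhile_length (p : Char → Bool) (l : List Char) :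
    (l.takeWhile p).length = l.findIdx (fun c => !p c) := by
  induction l with
  | nil => simp
  | cons x xs ih =>
    by_cases hx : p x = true
    · simp [List.findIdx_cons, hx, ih]
    · simp at hx; simp [List.findIdx_cons, hx]

theorem pv_findIdx_or (p q : Char → Bool) (l : List Char) :
    l.findIdx (fun c => p c || q c) = min (l.findIdx p) (l.findIdx q) := by
  induction l with
  | nil => simp
  | cons x xs ih =>
    cases hp : p x <;> cases hq : q x <;>
      simp only [List.findIdx_cons, hp, hq, ih, Bool.false_or, Bool.true_or, Bool.or_self,
        cond_true, cond_false] <;> omega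

theorem pv_dropWhile_eq_drop (p : Char → Bool) (l : List Char) :
    l.dropWhile p = l.drop (l.takeWhile p).length := by
  induction l with
  | nil => simp
  | cons x xs ih =>
    by_cases hx : p x = true
    · simp [hx, ih]
    · simp at hx; simp [List.dropWhile_cons, hx]

theorem pv_singleton_prefix (l : List Char) (c : Char) : [c] <+: l ↔ l.head? = some c := by
  constructor
  · rintro ⟨t, rfl⟩; rfl
  · cases l with
    | nil => intro h; simp at h
    | cons a t => intro h; simp at h; exact ⟨t, by simp [h]⟩

theorem pv_find_singleton (s : List Char) (c : Char) :
    PySem.Chars.find s [c] = if c ∈ s then (s.findIdx (· == c) : Int) else -1 := by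
  by_cases hm : c ∈ s
  · rw [if_pos hm]
    have h0 : 0 ≤ PySem.Chars.find s [c] :=
      (PySem.Chars.find_nonneg_iff s [c]).mpr ((List.singleton_infix_iff c s).mpr hm)
    obtain ⟨hpre, hmin⟩ := PySem.Chars.find_spec h0
    set k := (PySem.Chars.find s [c]).toNat with hk
    have hkc : s[k]? = some c := by
      rw [← List.head?_drop]; exact (pv_singleton_prefix _ c).mp hpre
    have hklen : k < s.length := by
      by_contra hge
      rw [List.getElem?_eq_none (by omega)] at hkc; simp at hkc
    set j := s.findIdx (· == c) with hj
    have hjlen : j < s.length := List.findIdx_lt_length.mpr ⟨c, hm, by simp⟩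
    have hjc : s[j] = c := by have := @List.findIdx_getElem _ (· == c) s hjlen; simpa using this
    have hkj : k = j := by
      rcases Nat.lt_trichotomy k j with h | h | h
      · have := List.not_of_lt_findIdx h
        rw [List.getElem?_eq_getElem hklen] at hkc
        simp_all
      · exact h
      · exfalso
        exact hmin j h ((pv_singleton_prefix _ c).mpr (by rw [List.head?_drop, List.getElem?_eq_getElem hjlen, hjc]))
    omega
  · rw [if_neg hm]
    exact (PySem.Chars.find_eq_neg_one_iff s [c]).mpr
      (fun h => hm ((List.singleton_infix_iff c s).mp h))

theorem pv_replace_go (c : Char) (l acc : List Char) (fuel : Nat) (h : l.length ≤ fuel) :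
    PySem.Chars.replace.go [c] [] fuel l acc = acc.reverse ++ l.filter (fun x => !(x == c)) := by
  induction l generalizing fuel acc with
  | nil => cases fuel <;> simp [PySem.Chars.replace.go]
  | cons x t ih =>
    cases fuel with
    | zero => simp at h
    | succ f =>
      rw [PySem.Chars.replace.go]
      by_cases hx : x = c
      · subst hx
        simp only [List.isPrefixOf, BEq.rfl, Bool.true_and, List.isPrefixOf_nil_left, if_true]
        simpa using ih acc f (by simpa using h)
      · have hbe : ([c].isPrefixOf (x :: t)) = false := by
          simp [List.isPrefixOf]; exact fun h' => (hx h'.symm).elim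
        rw [hbe]
        simp only [Bool.false_eq_true, if_false]
        rw [ih (x :: acc) f (by simpa using h)]
        simp [hx]

theorem pv_replace_filter (s : List Char) (c : Char) :
    PySem.Chars.replace s [c] [] = s.filter (fun x => !(x == c)) := by
  rw [PySem.Chars.replace]
  simpa using pv_replace_go c s [] s.length (le_refl _)

theorem pv_isIn_br (c : Char) : PySem.Chars.isIn [c] ['(', '{'] = pvBr c := by
  rw [pv_isIn_pair]; rfl

theorem pv_isIn_dl (c : Char) : PySem.Chars.isIn [c] ['=', ','] = pvDl c := by
  rw [pv_isIn_pair]; rfl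

theorem pv_br_not_dl (c : Char) (h : pvBr c = true) : pvDl c = false := by
  simp [pvBr] at h; rcases h with rfl | rfl <;> decide

theorem pv_aScan_acc (l : List Char) (save : Bool) (acc : List Char) :
    pvAScan l save acc = acc ++ pvAScan l save [] := by
  induction l generalizing save acc with
  | nil => simp [pvAScan]
  | cons c rest ih =>
    simp only [pvAScan]
    split_ifs with h1 h2 h3
    · rw [ih true acc]
    · simp
    · simp only [List.nil_append]
      rw [ih save (acc ++ [c]), ih save [c], List.append_assoc]
    · rw [ih save acc]

theorem pv_aScan_true (l : List Char) :
    pvAScan l true [] = (l.takeWhile (fun c => !pvDl c)).filter (fun c => !pvBr c) := by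
  induction l with
  | nil => simp [pvAScan]
  | cons c rest ih =>
    simp only [pvAScan, pv_isIn_br, pv_isIn_dl, List.takeWhile_cons]
    cases hb : pvBr c with
    | true =>
      have hd := pv_br_not_dl c hb
      simp [hd, List.filter_cons, hb, ih]
    | false =>
      cases hd : pvDl c with
      | true => simp [hd]
      | false =>
        simp only [hb, hd, Bool.false_eq_true, if_false, if_true, Bool.not_false,
          List.nil_append, List.takeWhile_cons, List.filter_cons]
        rw [pv_aScan_acc rest true [c], ih]
        simp [hb]

theorem pv_aScan_false (l : List Char) :
    pvAScan l false [] =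
      match (l.takeWhile (fun c => !pvDl c)).dropWhile (fun c => !pvBr c) with
      | [] => []
      | _ :: t => t.filter (fun c => !pvBr c) := by
  induction l with
  | nil => simp [pvAScan]
  | cons c rest ih =>
    simp only [pvAScan, pv_isIn_br, pv_isIn_dl, List.takeWhile_cons]
    cases hb : pvBr c with
    | true =>
      have hd := pv_br_not_dl c hb
      rw [pv_aScan_true]
      simp [hd, hb, List.dropWhile_cons, ih]
    | false =>
      cases hd : pvDl c with
      | true => simp [hd]
      | false =>
        simp only [hb, hd, Bool.false_eq_true, if_false, Bool.not_false, List.takeWhile_cons,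
          List.dropWhile_cons]
        rw [ih]
        simp [hb]

theorem pv_intercalate_nil (xs : List (List Char)) : ([] : List Char).intercalate xs = xs.flatten := by
  rw [List.intercalate]
  induction xs with
  | nil => rfl
  | cons x t ih =>
    cases t with
    | nil => simp
    | cons y u => simp_all [List.intersperse]

theorem pv_join_eq (block : List String) :
    (PySem.Str.join "" block).toList = block.foldl (fun bs line => bs ++ line.toList) [] := by
  rw [PySem.Str.join, PySem.Chars.join]
  rw [PySem.List.foldl_append_eq_flatMap (fun line : String => line.toList) block []]
  simp [pv_intercalate_nil, List.flatMap_def]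

theorem pv_cut_eq (s : List Char) :
    (['=', ','].foldl (fun cut d =>
      let j := PySem.Chars.find s [d]
      if j ≠ -1 ∧ j < cut then j else cut) ((s.length : Int)))
    = ((s.takeWhile (fun c => !pvDl c)).length : Int) := by
  have hfe := pv_find_singleton s '='
  have hfc := pv_find_singleton s ','
  have hle : s.findIdx (· == '=') ≤ s.length := List.findIdx_le_length
  have hlc : s.findIdx (· == ',') ≤ s.length := List.findIdx_le_length
  simp only [List.foldl_cons, List.foldl_nil]
  rw [pv_takeWhile_length]
  have hIdx : s.findIdx (fun c => !!pvDl c) = min (s.findIdx (· == '=')) (s.findIdx (· == ',')) := by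
    rw [show (fun c => !!pvDl c) = pvDl by funext c; simp]
    exact pv_findIdx_or _ _ s
  rw [hIdx]
  by_cases he : '=' ∈ s <;> by_cases hc : ',' ∈ s
  · have h1 : s.findIdx (· == '=') < s.length := List.findIdx_lt_length.mpr ⟨'=', he, by simp⟩
    have h2 : s.findIdx (· == ',') < s.length := List.findIdx_lt_length.mpr ⟨',', hc, by simp⟩
    rw [hfe, hfc, if_pos he, if_pos hc]
    omega
  · have h1 : s.findIdx (· == '=') < s.length := List.findIdx_lt_length.mpr ⟨'=', he, by simp⟩
    have h2 : s.findIdx (· == ',') = s.length :=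
      List.findIdx_eq_length.mpr (fun x hx => by simp; rintro rfl; exact hc hx)
    rw [hfe, hfc, if_pos he, if_neg hc]
    omega
  · have h1 : s.findIdx (· == '=') = s.length :=
      List.findIdx_eq_length.mpr (fun x hx => by simp; rintro rfl; exact he hx)
    have h2 : s.findIdx (· == ',') < s.length := List.findIdx_lt_length.mpr ⟨',', hc, by simp⟩
    rw [hfe, hfc, if_neg he, if_pos hc]
    omega
  · have h1 : s.findIdx (· == '=') = s.length :=
      List.findIdx_eq_length.mpr (fun x hx => by simp; rintro rfl; exact he hx)
    have h2 : s.findIdx (· == ',') = s.length :=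
      List.findIdx_eq_length.mpr (fun x hx => by simp; rintro rfl; exact hc hx)
    rw [hfe, hfc, if_neg he, if_neg hc]
    omega

theorem pv_br_eq (h : List Char) :
    (['(', '{'].foldl (fun br b =>
      let j := PySem.Chars.find h [b]
      if j ≠ -1 ∧ (br = -1 ∨ j < br) then j else br) (-1 : Int))
    = if ('(' ∈ h ∨ '{' ∈ h) then ((h.findIdx pvBr : Nat) : Int) else -1 := by
  have hfp := pv_find_singleton h '('
  have hfb := pv_find_singleton h '{'
  have hle : h.findIdx (· == '(') ≤ h.length := List.findIdx_le_length
  have hlc : h.findIdx (· == '{') ≤ h.length := List.findIdx_le_length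
  have hIdx : h.findIdx pvBr = min (h.findIdx (· == '(')) (h.findIdx (· == '{')) := by
    rw [show pvBr = (fun c => c == '(' || c == '{') by funext c; simp [pvBr]]
    exact pv_findIdx_or _ _ h
  simp only [List.foldl_cons, List.foldl_nil]
  rw [hIdx]
  by_cases hp : '(' ∈ h <;> by_cases hb : '{' ∈ h
  · have h1 : h.findIdx (· == '(') < h.length := List.findIdx_lt_length.mpr ⟨'(', hp, by simp⟩
    have h2 : h.findIdx (· == '{') < h.length := List.findIdx_lt_length.mpr ⟨'{', hb, by simp⟩
    rw [hfp, hfb, if_pos hp, if_pos hb, if_pos (Or.inl hp)]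
    simp only [true_or, and_true]
    omega
  · have h1 : h.findIdx (· == '(') < h.length := List.findIdx_lt_length.mpr ⟨'(', hp, by simp⟩
    have h2 : h.findIdx (· == '{') = h.length :=
      List.findIdx_eq_length.mpr (fun x hx => by simp; rintro rfl; exact hb hx)
    rw [hfp, hfb, if_pos hp, if_neg hb, if_pos (Or.inl hp)]
    simp only [true_or, and_true]
    omega
  · have h1 : h.findIdx (· == '(') = h.length :=
      List.findIdx_eq_length.mpr (fun x hx => by simp; rintro rfl; exact hp hx)
    have h2 : h.findIdx (· == '{') < h.length := List.findIdx_lt_length.mpr ⟨'{', hb, by simp⟩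
    rw [hfp, hfb, if_neg hp, if_pos hb, if_pos (Or.inr hb)]
    simp only [true_or, and_true]
    omega
  · have h1 : h.findIdx (· == '(') = h.length :=
      List.findIdx_eq_length.mpr (fun x hx => by simp; rintro rfl; exact hp hx)
    have h2 : h.findIdx (· == '{') = h.length :=
      List.findIdx_eq_length.mpr (fun x hx => by simp; rintro rfl; exact hb hx)
    rw [hfp, hfb, if_neg hp, if_neg hb, if_neg (show ¬('(' ∈ h ∨ '{' ∈ h) by tauto)]
    simp only [true_or, and_true]
    omega


theorem pv_main (block : List String) : getBlockID block = getBlockID_alt block := by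
  unfold getBlockID getBlockID_alt
  dsimp only
  rw [← pv_join_eq]
  set s := (PySem.Str.join "" block).toList with hs
  rw [pv_aScan_false, pv_cut_eq]
  have hhead : PySem.Chars.slice s none (some ((s.takeWhile (fun c => !pvDl c)).length : Int))
      = s.takeWhile (fun c => !pvDl c) := by
    rw [PySem.Chars.slice_eq_listSlice, PySem.List.slice_to_natCast]
    exact ((List.prefix_iff_eq_take).mp (List.takeWhile_prefix _)).symm
  rw [hhead, pv_br_eq]
  set H := s.takeWhile (fun c => !pvDl c) with hH
  by_cases hmem : ('(' ∈ H ∨ '{' ∈ H)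
  · rw [if_pos hmem]
    have hflen : H.findIdx pvBr < H.length := by
      rcases hmem with hm | hm
      · exact List.findIdx_lt_length.mpr ⟨'(', hm, by simp [pvBr]⟩
      · exact List.findIdx_lt_length.mpr ⟨'{', hm, by simp [pvBr]⟩
    rw [if_neg (by omega)]
    have hdw : H.dropWhile (fun c => !pvBr c) = H[H.findIdx pvBr] :: H.drop (H.findIdx pvBr + 1) := by
      rw [pv_dropWhile_eq_drop, pv_takeWhile_length]
      simp only [Bool.not_not]
      exact List.drop_eq_getElem_cons hflen
    rw [hdw]
    have hslice : PySem.Chars.slice H (some ((H.findIdx pvBr : Int) + 1)) none = H.drop (H.findIdx pvBr + 1) := by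
      rw [PySem.Chars.slice_eq_listSlice]
      rw [show ((H.findIdx pvBr : Int) + 1) = ((H.findIdx pvBr + 1 : Nat) : Int) by push_cast; ring]
      exact PySem.List.slice_from_natCast _ _
    rw [hslice, pv_replace_filter, pv_replace_filter, List.filter_filter]
    simp only []
    congr 1
    apply List.filter_congr
    intro a _
    cases h1 : a == '(' <;> cases h2 : a == '{' <;> simp [pvBr, h1, h2]
  · rw [if_neg hmem, if_pos rfl]
    have hnil : H.dropWhile (fun c => !pvBr c) = [] :=
      List.dropWhile_eq_nil_iff.mpr (fun x hx => by
        push_neg at hmem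
        simp [pvBr]
        exact ⟨fun h => hmem.1 (h ▸ hx), fun h => hmem.2 (h ▸ hx)⟩)
    rw [hnil]

-- ===== VERDICT (by name: the statement is the Claim_ definition above) =====
theorem getBlockID_spec : Claim_equal_getBlockID := by
  intro block _
  exact pv_main block
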